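-- pv_equiv track=rewrite | github.com/dadamczykk/graph-algorithms | project1/solution_greedy.py | my_solve
-- ===== SOURCE A (Python) =====
-- from queue import PriorityQueue
--
-- def my_solve(N, M, K, base, wages, eqCost):
--     queue = PriorityQueue()
--
--     for i in range(N):
--         for p in range(len(wages[i])):
--             wages[i][p] = wages[i][p][1] + eqCost[wages[i][p][0] - 1]
--         wages[i].sort()
--
--         for _ in range(len(wages[i])-len(base[i])):
--             wages[i].pop()
--
--         wages[i][0] += base[i][0]
--
--         for a in range(1, min(len(base[i]), len(wages[i]))):
--             wages[i][a] += base[i][a] - base[i][a-1]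
--
--         wages[i].reverse()
--         queue.put((wages[i][-1], i))
--
--     cost = 0
--     for _ in range(K):
--         toAdd, toInsPop = queue.get()
--         cost += toAdd
--         wages[toInsPop].pop()
--         if len(wages[toInsPop]) != 0:
--             queue.put((wages[toInsPop][-1], toInsPop))
--
--     return cost
-- ===== SOURCE B (Python) =====
-- def my_solve(N, M, K, base, wages, eqCost):
--     # Build each worker's increment list (ascending), without mutating wages.
--     prepared = []
--     for i in range(N):
--         inc = sorted(w + eqCost[p - 1] for p, w in wages[i])[:len(base[i])]
--         inc[0] += base[i][0]
--         for a in range(1, len(inc)):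
--             inc[a] += base[i][a] - base[i][a - 1]
--         prepared.append(inc)
--     # Consume the K cheapest available heads, one per step, via index pointers.
--     ptr = [0] * N
--     cost = 0
--     for _ in range(K):
--         j = min((i for i in range(N) if ptr[i] < len(prepared[i])),
--                 key=lambda i: (prepared[i][ptr[i]], i))
--         cost += prepared[j][ptr[j]]
--         ptr[j] += 1
--     return cost
-- ===== Notes on version B (the rewrite author's own statement) =====
-- stated objective: alternative
-- what changed: B replaces A's in-place wages mutation (transform, sort, pop-loop, reverse) and PriorityQueue of per-worker tails with pure per-worker increment lists built by sorted(...)[:len(base[i])] and a K-step selection that picks the (value, worker) minimum over index pointers by a linear scan, never mutating wages.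
import Mathlib
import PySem

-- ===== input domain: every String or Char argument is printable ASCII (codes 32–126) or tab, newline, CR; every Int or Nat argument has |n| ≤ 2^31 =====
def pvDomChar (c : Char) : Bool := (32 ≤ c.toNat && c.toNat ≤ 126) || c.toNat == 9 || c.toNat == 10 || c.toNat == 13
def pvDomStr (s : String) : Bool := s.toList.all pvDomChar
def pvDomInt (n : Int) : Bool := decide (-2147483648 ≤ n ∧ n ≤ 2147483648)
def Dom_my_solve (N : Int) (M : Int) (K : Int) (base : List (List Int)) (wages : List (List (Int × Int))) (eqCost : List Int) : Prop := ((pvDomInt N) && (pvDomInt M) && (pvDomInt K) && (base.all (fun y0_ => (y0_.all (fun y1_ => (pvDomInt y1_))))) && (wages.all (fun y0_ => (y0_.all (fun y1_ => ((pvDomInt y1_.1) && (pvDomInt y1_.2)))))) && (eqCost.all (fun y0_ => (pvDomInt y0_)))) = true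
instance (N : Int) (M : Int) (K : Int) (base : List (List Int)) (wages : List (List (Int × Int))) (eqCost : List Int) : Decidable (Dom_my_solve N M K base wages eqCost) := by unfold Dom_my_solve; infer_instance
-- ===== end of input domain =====

-- B is an alternative implementation: pure per-worker increment lists plus a pointer-scan
-- K-step selection instead of A's in-place wages mutation and PriorityQueue; A mutates its
-- 'wages' argument in place while B does not — the equivalence proved here is about the
-- RETURN value only.

-- ===== PORT A =====
-- strict lexicographic < on (Int × Int), the order PriorityQueue uses on its tuples
def pvLexLt (a b : Int × Int) : Bool := a.1 < b.1 || (a.1 == b.1 && a.2 < b.2)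

-- queue.get(): remove and return the lexicographically smallest entry (the queue is modelled
-- as the list of its entries; entries have pairwise distinct worker indices, so the minimum
-- is unique and this is exactly PriorityQueue behaviour)
def pvPQGet (q : List (Int × Int)) : (Int × Int) × List (Int × Int) :=
  match q with
  | [] => ((0, 0), [])  -- Python blocks forever here; excluded by Pre_
  | x :: xs =>
    let m := xs.foldl (fun b y => if pvLexLt y b then y else b) x
    (m, (x :: xs).erase m)

-- body of A's first loop on worker i: transform wages[i], sort, pop down to len(base[i]),
-- add base[i][0], add base differences, reverse
def pvPrepA (wi : List (Int × Int)) (bi : List Int) (eqCost : List Int) : List Int :=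
  let w1 := wi.map (fun pw => pw.2 + PySem.List.pyGetD eqCost (pw.1 - 1) 0)
  let w2 := PySem.List.sorted w1 (fun x => x) false
  let w3 := (List.range (w2.length - bi.length)).foldl (fun l _ => l.dropLast) w2
  let w4 := match w3 with
    | [] => []  -- Python raises IndexError on wages[i][0]; excluded by Pre_
    | x :: xs => (x + PySem.List.pyGetD bi 0 0) :: xs
  let w5 := (PySem.List.pyRange 1 (min (bi.length : Int) (w4.length : Int)) 1).foldl
      (fun l a => l.set a.toNat
        (PySem.List.pyGetD l a 0 + (PySem.List.pyGetD bi a 0 - PySem.List.pyGetD bi (a - 1) 0))) w4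
  w5.reverse

def my_solve (N : Int) (M : Int) (K : Int) (base : List (List Int)) (wages : List (List (Int × Int))) (eqCost : List Int) : Int :=
  -- first loop: build the processed wages[i] lists and fill the queue
  let st0 := (PySem.List.pyRange 0 N 1).foldl
    (fun (st : List (List Int) × List (Int × Int)) i =>
      let w := pvPrepA (PySem.List.pyGetD wages i []) (PySem.List.pyGetD base i []) eqCost
      (st.1 ++ [w], st.2 ++ [(PySem.List.pyGetD w (-1) 0, i)])) ([], [])
  -- second loop: K extractions
  let fin := (PySem.List.pyRange 0 K 1).foldl
    (fun (st : Int × List (List Int) × List (Int × Int)) _ =>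
      let r := pvPQGet st.2.2
      let lj := PySem.List.pyGetD st.2.1 r.1.2 []
      let lj' := lj.dropLast
      (st.1 + r.1.1, st.2.1.set r.1.2.toNat lj',
        if lj' ≠ [] then r.2 ++ [(PySem.List.pyGetD lj' (-1) 0, r.1.2)] else r.2))
    (0, st0.1, st0.2)
  fin.1

-- ===== PORT B =====
-- B's per-worker preparation: sorted increments truncated to len(base[i]), then base added
def pvPrepB (wi : List (Int × Int)) (bi : List Int) (eqCost : List Int) : List Int :=
  let inc := (PySem.List.sorted (wi.map (fun pw => pw.2 + PySem.List.pyGetD eqCost (pw.1 - 1) 0))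
      (fun x => x) false).take bi.length
  let inc0 := match inc with
    | [] => []  -- Python raises IndexError on inc[0]; excluded by Pre_
    | x :: xs => (x + PySem.List.pyGetD bi 0 0) :: xs
  (PySem.List.pyRange 1 (inc0.length : Int) 1).foldl
    (fun l a => l.set a.toNat
      (PySem.List.pyGetD l a 0 + (PySem.List.pyGetD bi a 0 - PySem.List.pyGetD bi (a - 1) 0))) inc0

def my_solve_alt (N : Int) (M : Int) (K : Int) (base : List (List Int)) (wages : List (List (Int × Int))) (eqCost : List Int) : Int :=
  let prepared := (PySem.List.pyRange 0 N 1).foldl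
    (fun acc i => acc ++ [pvPrepB (PySem.List.pyGetD wages i []) (PySem.List.pyGetD base i []) eqCost]) []
  let fin := (PySem.List.pyRange 0 K 1).foldl
    (fun (st : Int × List Int) _ =>
      -- min over candidate workers by key (prepared[i][ptr[i]], i); ties keep the first,
      -- i.e. the smallest i, exactly Python's min
      let best := (PySem.List.pyRange 0 N 1).foldl
        (fun (b : Option (Int × Int)) i =>
          if PySem.List.pyGetD st.2 i 0 < ((PySem.List.pyGetD prepared i []).length : Int) then
            let v := PySem.List.pyGetD (PySem.List.pyGetD prepared i [])
                (PySem.List.pyGetD st.2 i 0) 0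
            match b with
            | none => some (v, i)
            | some bv => if v < bv.1 then some (v, i) else some bv
          else b) none
      match best with
      | none => st  -- Python's min raises ValueError here; excluded by Pre_
      | some vj => (st.1 + vj.1, st.2.set vj.2.toNat (PySem.List.pyGetD st.2 vj.2 0 + 1)))
    (0, List.replicate N.toNat 0)
  fin.1

-- ===== PRECONDITION & SPEC =====
-- Pre_: exactly the inputs where A returns: the first N rows of wages/base exist and are
-- nonempty, every eqCost index wages[i][p][0]-1 is a valid Python index (negative wraparound
-- allowed), and K does not exceed the total number of kept increments (otherwise A blocks
-- forever on an empty PriorityQueue).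
def Pre_my_solve (N : Int) (M : Int) (K : Int) (base : List (List Int)) (wages : List (List (Int × Int))) (eqCost : List Int) : Prop :=
  N.toNat ≤ base.length ∧ N.toNat ≤ wages.length ∧
  (∀ i < N.toNat, wages.getD i [] ≠ [] ∧ base.getD i [] ≠ [] ∧
    ∀ pw ∈ wages.getD i [], -(eqCost.length : Int) ≤ pw.1 - 1 ∧ pw.1 - 1 < (eqCost.length : Int)) ∧
  K.toNat ≤ ((List.range N.toNat).map
    (fun i => min (wages.getD i []).length (base.getD i []).length)).sum

instance (N : Int) (M : Int) (K : Int) (base : List (List Int)) (wages : List (List (Int × Int))) (eqCost : List Int) : Decidable (Pre_my_solve N M K base wages eqCost) := by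
  unfold Pre_my_solve; infer_instance

def pvWitness_my_solve : Int × Int × Int × List (List Int) × (List (List (Int × Int))) × List Int :=
  (2, 0, 2, [[2], [1, 4]], [[(1, 3)], [(2, 0), (1, 7)]], [5, -1])

def Spec_my_solve (N : Int) (M : Int) (K : Int) (base : List (List Int)) (wages : List (List (Int × Int))) (eqCost : List Int) (out : Int) : Prop := out = my_solve_alt N M K base wages eqCost
instance (N : Int) (M : Int) (K : Int) (base : List (List Int)) (wages : List (List (Int × Int))) (eqCost : List Int) (out : Int) : Decidable (Spec_my_solve N M K base wages eqCost out) := by unfold Spec_my_solve; infer_instance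

-- ===== CLAIM (what is proved, stated in full; the proofs are below) =====
def Claim_equal_my_solve : Prop := ∀ (N : Int) (M : Int) (K : Int) (base : List (List Int)) (wages : List (List (Int × Int))) (eqCost : List Int), Dom_my_solve N M K base wages eqCost → Pre_my_solve N M K base wages eqCost → Spec_my_solve N M K base wages eqCost (my_solve N M K base wages eqCost)

-- ===== LEMMAS AND PROOFS =====

-- non-strict lexicographic order on the queue entries
def pvLexLe (a b : Int × Int) : Prop := a.1 < b.1 ∨ (a.1 = b.1 ∧ a.2 ≤ b.2)

-- the candidate entry of worker i: (current head value, i) if worker i still has increments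
def pvEnt (pre : List (List Int)) (p : List Nat) (i : Nat) : Option (Int × Int) :=
  if p.getD i 0 < (pre.getD i []).length then
    some ((pre.getD i []).getD (p.getD i 0) 0, (i : Int))
  else none

-- the multiset of live queue entries determined by the pointers
def pvCand (pre : List (List Int)) (p : List Nat) : List (Int × Int) :=
  (List.range pre.length).filterMap (pvEnt pre p)

-- the body of A's K-loop, named so the fold can be reasoned about
def pvStepA (st : Int × List (List Int) × List (Int × Int)) (_ : Int) :
    Int × List (List Int) × List (Int × Int) :=
  let r := pvPQGet st.2.2
  let lj := PySem.List.pyGetD st.2.1 r.1.2 []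
  let lj' := lj.dropLast
  (st.1 + r.1.1, st.2.1.set r.1.2.toNat lj',
    if lj' ≠ [] then r.2 ++ [(PySem.List.pyGetD lj' (-1) 0, r.1.2)] else r.2)

-- the body of B's K-loop
def pvStepB (prepared : List (List Int)) (N : Int) (st : Int × List Int) (_ : Int) : Int × List Int :=
  let best := (PySem.List.pyRange 0 N 1).foldl
    (fun (b : Option (Int × Int)) i =>
      if PySem.List.pyGetD st.2 i 0 < ((PySem.List.pyGetD prepared i []).length : Int) then
        let v := PySem.List.pyGetD (PySem.List.pyGetD prepared i [])
            (PySem.List.pyGetD st.2 i 0) 0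
        match b with
        | none => some (v, i)
        | some bv => if v < bv.1 then some (v, i) else some bv
      else b) none
  match best with
  | none => st
  | some vj => (st.1 + vj.1, st.2.set vj.2.toNat (PySem.List.pyGetD st.2 vj.2 0 + 1))

-- B's scan written over Nat indices and the abstract pointer list
def pvScan (pre : List (List Int)) (p : List Nat) (n : Nat) : Option (Int × Int) :=
  (List.range n).foldl
    (fun (b : Option (Int × Int)) i =>
      if (p.getD i 0 : Int) < ((pre.getD i []).length : Int) then
        match b with
        | none => some ((pre.getD i []).getD (p.getD i 0) 0, (i : Int))
        | some bv => if (pre.getD i []).getD (p.getD i 0) 0 < bv.1 then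
            some ((pre.getD i []).getD (p.getD i 0) 0, (i : Int)) else some bv
      else b) none

-- the simulation invariant between A's state and B's state with rem steps left
def pvInv (pre : List (List Int)) (sA : Int × List (List Int) × List (Int × Int))
    (sB : Int × List Int) (rem : Nat) : Prop :=
  ∃ p : List Nat, p.length = pre.length ∧ sB.2 = p.map (fun x => (x : Int)) ∧ sA.1 = sB.1 ∧
    sA.2.1 = (List.range pre.length).map (fun i => ((pre.getD i []).drop (p.getD i 0)).reverse) ∧
    sA.2.2.Perm (pvCand pre p) ∧ (∀ i < pre.length, p.getD i 0 ≤ (pre.getD i []).length) ∧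
    rem + ((List.range pre.length).map (fun i => p.getD i 0)).sum
      ≤ ((List.range pre.length).map (fun i => (pre.getD i []).length)).sum

theorem pvLexLe_antisymm {a b : Int × Int} (h1 : pvLexLe a b) (h2 : pvLexLe b a) : a = b := by
  unfold pvLexLe at *
  have : a.1 = b.1 ∧ a.2 = b.2 := by omega
  exact Prod.ext this.1 this.2

theorem pvLexLt_iff (a b : Int × Int) :
    pvLexLt a b = true ↔ a.1 < b.1 ∨ (a.1 = b.1 ∧ a.2 < b.2) := by unfold pvLexLt; simp

theorem pvFoldMin_spec (xs : List (Int × Int)) (x : Int × Int) :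
    (xs.foldl (fun b y => if pvLexLt y b then y else b) x) ∈ x :: xs ∧
    ∀ y ∈ x :: xs, pvLexLe (xs.foldl (fun b y => if pvLexLt y b then y else b) x) y := by
  induction xs generalizing x with
  | nil => simp [pvLexLe]
  | cons z zs ih =>
    have step : (z :: zs).foldl (fun b y => if pvLexLt y b then y else b) x
        = zs.foldl (fun b y => if pvLexLt y b then y else b) (if pvLexLt z x then z else x) := by
      simp [List.foldl_cons]
    obtain ⟨hmem, hle⟩ := ih (if pvLexLt z x then z else x)
    rw [step]
    constructor
    · rcases List.mem_cons.mp hmem with h | h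
      · rw [h]; by_cases hc : pvLexLt z x = true <;> simp [hc]
      · simp [h]
    · intro y hy
      have hx : pvLexLe (if pvLexLt z x then z else x) x := by
        split
        · rename_i hzx; rw [pvLexLt_iff] at hzx; unfold pvLexLe; omega
        · exact Or.inr ⟨rfl, le_refl _⟩
      have hz : pvLexLe (if pvLexLt z x then z else x) z := by
        split
        · exact Or.inr ⟨rfl, le_refl _⟩
        · rename_i hzx
          have : ¬ (z.1 < x.1 ∨ (z.1 = x.1 ∧ z.2 < x.2)) := by rw [← pvLexLt_iff]; simpa using hzx
          unfold pvLexLe; omega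
      have htrans : ∀ a b c : Int × Int, pvLexLe a b → pvLexLe b c → pvLexLe a c := by
        intro a b c h1 h2; unfold pvLexLe at *; omega
      have hm' : pvLexLe (zs.foldl (fun b y => if pvLexLt y b then y else b) (if pvLexLt z x then z else x)) (if pvLexLt z x then z else x) :=
        hle _ (List.mem_cons_self)
      rcases List.mem_cons.mp hy with rfl | hy2
      · exact htrans _ _ _ hm' hx
      · rcases List.mem_cons.mp hy2 with rfl | hy3
        · exact htrans _ _ _ hm' hz
        · exact hle _ (List.mem_cons_of_mem _ hy3)

theorem pvPQGet_eq (q : List (Int × Int)) (m : Int × Int) (hm : m ∈ q)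
    (hmin : ∀ y ∈ q, pvLexLe m y) : pvPQGet q = (m, q.erase m) := by
  cases q with
  | nil => simp at hm
  | cons x xs =>
    obtain ⟨h1, h2⟩ := pvFoldMin_spec xs x
    have he : xs.foldl (fun b y => if pvLexLt y b then y else b) x = m :=
      pvLexLe_antisymm (h2 m hm) (hmin _ h1)
    simp [pvPQGet, he]

theorem pvEnt_snd {pre : List (List Int)} {p : List Nat} {i : Nat} {z : Int × Int}
    (h : pvEnt pre p i = some z) :
    z.2 = (i : Int) ∧ p.getD i 0 < (pre.getD i []).length ∧
      z.1 = (pre.getD i []).getD (p.getD i 0) 0 := by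
  unfold pvEnt at h
  split at h
  · cases h; simp_all
  · cases h

theorem pvFilterMap_mem {l : List Nat} {pre : List (List Int)} {p : List Nat} {z : Int × Int}
    (h : z ∈ l.filterMap (pvEnt pre p)) : ∃ i ∈ l, pvEnt pre p i = some z := by
  simpa using List.mem_filterMap.mp h

theorem pvScan_spec (pre : List (List Int)) (p : List Nat) (n : Nat) :
    (pvScan pre p n = none → (List.range n).filterMap (pvEnt pre p) = []) ∧
    (∀ m, pvScan pre p n = some m →
      m ∈ (List.range n).filterMap (pvEnt pre p) ∧
      ∀ y ∈ (List.range n).filterMap (pvEnt pre p), pvLexLe m y) := by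
  induction n with
  | zero => simp [pvScan]
  | succ n ih =>
    have hstep : pvScan pre p (n+1) =
        (if (p.getD n 0 : Int) < ((pre.getD n []).length : Int) then
          match pvScan pre p n with
          | none => some ((pre.getD n []).getD (p.getD n 0) 0, (n : Int))
          | some bv => if (pre.getD n []).getD (p.getD n 0) 0 < bv.1 then
              some ((pre.getD n []).getD (p.getD n 0) 0, (n : Int)) else some bv
        else pvScan pre p n) := by
      unfold pvScan
      rw [List.range_succ, List.foldl_append]
      rfl
    have hcand : (List.range (n+1)).filterMap (pvEnt pre p)
        = (List.range n).filterMap (pvEnt pre p) ++ (pvEnt pre p n).toList := by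
      rw [List.range_succ, List.filterMap_append]
      cases h : pvEnt pre p n <;> simp [h]
    by_cases hc : p.getD n 0 < (pre.getD n []).length
    · have hcI : ((p.getD n 0 : Nat) : Int) < ((pre.getD n []).length : Int) := by exact_mod_cast hc
      have hent : pvEnt pre p n = some ((pre.getD n []).getD (p.getD n 0) 0, (n : Int)) := by
        unfold pvEnt; rw [if_pos hc]
      set e : Int × Int := ((pre.getD n []).getD (p.getD n 0) 0, (n : Int)) with he
      rw [hcand, hent]
      cases hs : pvScan pre p n with
      | none =>
        have hnil := ih.1 hs
        rw [hstep, if_pos hcI, hs]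
        constructor
        · intro h; cases h
        · intro m hm
          cases hm
          rw [hnil]
          constructor
          · simp
          · intro y hy
            simp at hy
            rw [hy]
            exact Or.inr ⟨rfl, le_refl _⟩
      | some bv =>
        obtain ⟨hbvmem, hbvmin⟩ := ih.2 bv hs
        rw [hstep, if_pos hcI, hs]
        have hred : (match some bv with
          | none => some ((pre.getD n []).getD (p.getD n 0) 0, (n : Int))
          | some bv => if (pre.getD n []).getD (p.getD n 0) 0 < bv.1 then
              some ((pre.getD n []).getD (p.getD n 0) 0, (n : Int)) else some bv)
            = if e.1 < bv.1 then some e else some bv := rfl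
        rw [hred]
        by_cases hlt : e.1 < bv.1
        · rw [if_pos (by exact hlt)]
          constructor
          · intro h; cases h
          · intro m hm
            cases hm
            constructor
            · simp
            · intro y hy
              rcases List.mem_append.mp hy with hy1 | hy2
              · have := hbvmin y hy1
                unfold pvLexLe at *
                omega
              · simp at hy2
                rw [hy2]
                exact Or.inr ⟨rfl, le_refl _⟩
        · rw [if_neg hlt]
          constructor
          · intro h; cases h
          · intro m hm
            cases hm
            constructor
            · exact List.mem_append_left _ hbvmem
            · intro y hy
              rcases List.mem_append.mp hy with hy1 | hy2
              · exact hbvmin y hy1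
              · simp at hy2
                obtain ⟨i, hi, hei⟩ := pvFilterMap_mem hbvmem
                have hsnd := (pvEnt_snd hei).1
                have hin : i < n := List.mem_range.mp hi
                rw [hy2]
                unfold pvLexLe
                have h2 : bv.2 = (i : Int) := hsnd
                have : (i : Int) < (n : Int) := by exact_mod_cast hin
                have he2 : e.2 = (n : Int) := rfl
                omega
    · have hcI : ¬ ((p.getD n 0 : Nat) : Int) < ((pre.getD n []).length : Int) := by
        exact_mod_cast hc
      have hent : pvEnt pre p n = none := by unfold pvEnt; rw [if_neg hc]
      rw [hcand, hent]
      rw [hstep, if_neg hcI]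
      simpa using ih

theorem pvRange_split (j n : Nat) (h : j < n) :
    List.range n = List.range j ++ j :: (List.range (n - j - 1)).map (fun k => j + 1 + k) := by
  have h1 : n = (j + 1) + (n - j - 1) := by omega
  conv_lhs => rw [h1]
  rw [List.range_add, List.range_succ]
  simp [List.append_assoc]

theorem pvGetD_map_cast (p : List Nat) (k : Nat) :
    (p.map (fun x => (x : Int))).getD k 0 = ((p.getD k 0 : Nat) : Int) := by
  induction p generalizing k with
  | nil => simp [List.getD]
  | cons a t ih =>
    cases k with
    | zero => rfl
    | succ k => simpa [List.getD] using ih k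

theorem pvGetD_set_ne {α : Type} (l : List α) (j i : Nat) (a d : α) (h : i ≠ j) :
    (l.set j a).getD i d = l.getD i d := by
  simp [List.getD, List.getElem?_set_ne (Ne.symm h)]

theorem pvGetD_set_self {α : Type} (l : List α) (j : Nat) (a d : α) (h : j < l.length) :
    (l.set j a).getD j d = a := by
  simp [List.getD, List.getElem?_set_self, h]

theorem pvMapRange_set (n : Nat) {α : Type} (f : Nat → α) (j : Nat) (v : α) (hj : j < n) :
    ((List.range n).map f).set j v = (List.range n).map (fun i => if i = j then v else f i) := by
  apply List.ext_getElem
  · simp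
  · intro i hi hi2
    simp only [List.length_map, List.length_range] at hi hi2
    rcases eq_or_ne i j with rfl | hne
    · rw [List.getElem_set_self (by simpa using hi)]
      simp
    · rw [List.getElem_set_ne (by omega)]
      simp [hne]

theorem pvSum_lt_exists (n : Nat) (f g : Nat → Nat) (hfg : ∀ i < n, f i ≤ g i)
    (h : ((List.range n).map f).sum < ((List.range n).map g).sum) : ∃ i < n, f i < g i := by
  by_contra hc
  push_neg at hc
  have hle : ∀ m : Nat, m ≤ n → ((List.range m).map g).sum ≤ ((List.range m).map f).sum := by
    intro m
    induction m with
    | zero => simp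
    | succ m ih =>
      intro hm
      rw [List.range_succ]
      simp only [List.map_append, List.sum_append, List.map_cons, List.map_nil, List.sum_cons,
        List.sum_nil]
      have := hc m (by omega)
      have := ih (by omega)
      omega
  have := hle n le_rfl
  omega

theorem pvDropRev_dropLast (l : List Int) (k : Nat) (h : k < l.length) :
    ((l.drop k).reverse).dropLast = (l.drop (k + 1)).reverse := by
  rw [List.drop_eq_getElem_cons h]
  simp

theorem pvDropRev_last (l : List Int) (k : Nat) (h : k < l.length) :
    PySem.List.pyGetD ((l.drop k).reverse) (-1) 0 = l.getD k 0 := by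
  have hne : (l.drop k).reverse ≠ [] := by
    simp [List.drop_eq_nil_iff]
    omega
  rw [PySem.List.pyGetD_neg_one _ _ hne]
  have h1 : ((l.drop k).reverse).getLast? = some l[k] := by
    rw [List.getLast?_reverse, List.drop_eq_getElem_cons h]
    rfl
  rw [List.getLast?_eq_some_getLast hne] at h1
  have h2 := Option.some.inj h1
  rw [h2]
  simp [List.getD, List.getElem?_eq_getElem h]

theorem pvDropRev_ne_nil (l : List Int) (k : Nat) :
    (l.drop k).reverse ≠ [] ↔ k < l.length := by
  simp [List.drop_eq_nil_iff]

theorem pvDropIter (m : Nat) (l : List Int) :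
    (List.range m).foldl (fun l _ => l.dropLast) l = l.take (l.length - m) := by
  induction m with
  | zero => simp
  | succ m ih =>
    rw [List.range_succ, List.foldl_append, ih]
    simp only [List.foldl_cons, List.foldl_nil]
    rw [List.dropLast_eq_take, List.take_take, List.length_take]
    congr 1
    omega

theorem pvTakeEq (l : List Int) (b : Nat) :
    l.take (l.length - (l.length - b)) = l.take b := by
  by_cases h : b ≤ l.length
  · congr 1
    omega
  · have h1 : l.length - (l.length - b) = l.length := by omega
    rw [h1, List.take_of_length_le le_rfl, List.take_of_length_le (by omega)]

theorem pvFoldSet_length (bi : List Int) (ls : List Int) (l : List Int) :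
    (ls.foldl (fun l a => l.set a.toNat (PySem.List.pyGetD l a 0 +
      (PySem.List.pyGetD bi a 0 - PySem.List.pyGetD bi (a - 1) 0))) l).length = l.length := by
  induction ls generalizing l with
  | nil => rfl
  | cons x t ih => simp [ih]

theorem pvPrepB_length (wi : List (Int × Int)) (bi : List Int) (eqCost : List Int) :
    (pvPrepB wi bi eqCost).length = min wi.length bi.length := by
  simp only [pvPrepB]
  rw [pvFoldSet_length]
  set inc := (PySem.List.sorted (wi.map (fun pw => pw.2 + PySem.List.pyGetD eqCost (pw.1 - 1) 0))
      (fun x => x) false).take bi.length with hinc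
  have h1 : (match inc with
    | [] => ([] : List Int)
    | x :: xs => (x + PySem.List.pyGetD bi 0 0) :: xs).length = inc.length := by
    cases inc <;> rfl
  rw [h1, hinc, List.length_take, PySem.List.length_sorted, List.length_map, Nat.min_comm]

theorem pvPrepAB (wi : List (Int × Int)) (bi : List Int) (eqCost : List Int) :
    pvPrepA wi bi eqCost = (pvPrepB wi bi eqCost).reverse := by
  simp only [pvPrepA, pvPrepB]
  rw [pvDropIter, pvTakeEq]
  set inc := (PySem.List.sorted (wi.map (fun pw => pw.2 + PySem.List.pyGetD eqCost (pw.1 - 1) 0))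
      (fun x => x) false).take bi.length with hinc
  set inc0 := (match inc with
    | [] => ([] : List Int)
    | x :: xs => (x + PySem.List.pyGetD bi 0 0) :: xs) with hinc0
  have hlen : inc0.length = inc.length := by rw [hinc0]; cases inc <;> rfl
  have hle : inc0.length ≤ bi.length := by
    rw [hlen, hinc, List.length_take]
    omega
  have hmin : min (bi.length : Int) (inc0.length : Int) = (inc0.length : Int) := by
    rw [min_eq_right]
    exact_mod_cast hle
  rw [hmin]

theorem pvEnt_set_ne (pre : List (List Int)) (p : List Nat) (j v i : Nat) (h : i ≠ j) :
    pvEnt pre (p.set j v) i = pvEnt pre p i := by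
  unfold pvEnt
  rw [pvGetD_set_ne _ _ _ _ _ h]

theorem pvCand_split (pre : List (List Int)) (p : List Nat) (j : Nat) (hj : j < pre.length) :
    pvCand pre p = (List.range j).filterMap (pvEnt pre p) ++ (pvEnt pre p j).toList
      ++ ((List.range (pre.length - j - 1)).map (fun k => j + 1 + k)).filterMap (pvEnt pre p) := by
  unfold pvCand
  rw [pvRange_split j pre.length hj, List.filterMap_append, List.filterMap_cons]
  cases hE : pvEnt pre p j <;> simp [hE]

theorem pvFilterMap_eq_map (l : List Nat) (f : Nat → Option (Int × Int)) (g : Nat → Int × Int)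
    (h : ∀ i ∈ l, f i = some (g i)) : l.filterMap f = l.map g := by
  induction l with
  | nil => rfl
  | cons a t ih =>
    rw [List.filterMap_cons, h a List.mem_cons_self, List.map_cons,
      ih (fun i hi => h i (List.mem_cons_of_mem _ hi))]

theorem pvSumRange_set (n j : Nat) (p : List Nat) (v : Nat) (hj : j < n) (hjp : j < p.length) :
    ((List.range n).map (fun i => (p.set j v).getD i 0)).sum + p.getD j 0
      = ((List.range n).map (fun i => p.getD i 0)).sum + v := by
  rw [pvRange_split j n hj]
  simp only [List.map_append, List.sum_append, List.map_cons, List.sum_cons, List.map_map]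
  rw [pvGetD_set_self _ _ _ _ hjp]
  have hP : (List.range j).map (fun i => (p.set j v).getD i 0)
      = (List.range j).map (fun i => p.getD i 0) := by
    apply List.map_congr_left
    intro i hi
    exact pvGetD_set_ne _ _ _ _ _ (by have := List.mem_range.mp hi; omega)
  have hS : (List.range (n - j - 1)).map ((fun i => (p.set j v).getD i 0) ∘ fun k => j + 1 + k)
      = (List.range (n - j - 1)).map ((fun i => p.getD i 0) ∘ fun k => j + 1 + k) := by
    apply List.map_congr_left
    intro i _
    simp only [Function.comp]
    exact pvGetD_set_ne _ _ _ _ _ (by omega)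
  rw [hP, hS]
  omega

theorem pvMapCast_set (p : List Nat) (j v : Nat) :
    (p.map (fun x => (x : Int))).set j ((v : Nat) : Int) = (p.set j v).map (fun x => (x : Int)) := by
  induction p generalizing j with
  | nil => rfl
  | cons a t ih =>
    cases j with
    | zero => rfl
    | succ n => simpa using ih n

theorem pvStep (pre : List (List Int)) (N : Int) (hN : N.toNat = pre.length)
    (sA : Int × List (List Int) × List (Int × Int)) (sB : Int × List Int) (rem : Nat) (x y : Int)
    (h : pvInv pre sA sB (rem + 1)) : pvInv pre (pvStepA sA x) (pvStepB pre N sB y) rem := by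
  obtain ⟨p, hplen, hB2, hcost, hA2, hperm, hlen, hsum⟩ := h
  -- there is a live worker, so the scan finds the minimum entry m
  have hex : ∃ i < pre.length, p.getD i 0 < (pre.getD i []).length :=
    pvSum_lt_exists pre.length _ _ (fun i hi => hlen i hi) (by omega)
  obtain ⟨i0, hi0, hp0⟩ := hex
  have hcand_ne : pvCand pre p ≠ [] := by
    have hm0 : ((pre.getD i0 []).getD (p.getD i0 0) 0, (i0 : Int)) ∈ pvCand pre p := by
      unfold pvCand
      exact List.mem_filterMap.mpr ⟨i0, List.mem_range.mpr hi0, by unfold pvEnt; rw [if_pos hp0]⟩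
    intro hnil
    rw [hnil] at hm0
    cases hm0
  obtain ⟨m, hscan⟩ : ∃ m, pvScan pre p pre.length = some m := by
    cases hs : pvScan pre p pre.length with
    | none => exact absurd ((pvScan_spec pre p pre.length).1 hs) hcand_ne
    | some m => exact ⟨m, rfl⟩
  obtain ⟨hmcand, hmin⟩ := (pvScan_spec pre p pre.length).2 m hscan
  obtain ⟨j, hjr, hentj⟩ := pvFilterMap_mem hmcand
  have hj : j < pre.length := List.mem_range.mp hjr
  obtain ⟨hm2, hpj, hm1⟩ := pvEnt_snd hentj
  have hjp : j < p.length := by omega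
  set pj := p.getD j 0 with hpjdef
  set p' := p.set j (pj + 1) with hp'
  -- A's extraction really pops m
  have hmq : m ∈ sA.2.2 := hperm.mem_iff.mpr hmcand
  have hminq : ∀ y ∈ sA.2.2, pvLexLe m y := fun z hz => hmin z (hperm.mem_iff.mp hz)
  have hpq := pvPQGet_eq sA.2.2 m hmq hminq
  -- B's scan equals pvScan
  have hfold : (PySem.List.pyRange 0 N 1).foldl
      (fun (b : Option (Int × Int)) i =>
        if PySem.List.pyGetD sB.2 i 0 < ((PySem.List.pyGetD pre i []).length : Int) then
          let v := PySem.List.pyGetD (PySem.List.pyGetD pre i [])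
              (PySem.List.pyGetD sB.2 i 0) 0
          match b with
          | none => some (v, i)
          | some bv => if v < bv.1 then some (v, i) else some bv
        else b) none = pvScan pre p pre.length := by
    rw [hB2, PySem.List.pyRange_zero, hN, List.foldl_map]
    unfold pvScan
    congr 1
    funext b k
    simp only [PySem.List.pyGetD_natCast, pvGetD_map_cast]
  have hBstep : pvStepB pre N sB y
      = (sB.1 + m.1, p'.map (fun x => (x : Int))) := by
    simp only [pvStepB]
    rw [hfold, hscan]
    show (sB.1 + m.1, sB.2.set m.2.toNat (PySem.List.pyGetD sB.2 m.2 0 + 1))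
        = (sB.1 + m.1, p'.map (fun x => (x : Int)))
    have hupd : sB.2.set m.2.toNat (PySem.List.pyGetD sB.2 m.2 0 + 1)
        = p'.map (fun x => (x : Int)) := by
      rw [hB2, hm2, Int.toNat_natCast, PySem.List.pyGetD_natCast, pvGetD_map_cast, hp']
      rw [show ((p.getD j 0 : Nat) : Int) + 1 = (((pj + 1 : Nat)) : Int) by push_cast; ring]
      exact pvMapCast_set p j (pj + 1)
    rw [hupd]
  -- A's list read and update
  have hlj : PySem.List.pyGetD sA.2.1 ((j : Nat) : Int) [] = ((pre.getD j []).drop pj).reverse := by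
    rw [PySem.List.pyGetD_natCast, hA2, PySem.List.getD_map_range _ _ _ _ hj]
  have hAstep : pvStepA sA x
      = (sA.1 + m.1, sA.2.1.set j (((pre.getD j []).drop (pj + 1)).reverse),
        if ((pre.getD j []).drop (pj + 1)).reverse ≠ [] then
          sA.2.2.erase m ++ [(PySem.List.pyGetD (((pre.getD j []).drop (pj + 1)).reverse) (-1) 0, m.2)]
        else sA.2.2.erase m) := by
    simp only [pvStepA]
    rw [hpq]
    simp only [hm2, Int.toNat_natCast, hlj, pvDropRev_dropLast _ _ hpj]
  -- the split of the candidate list at j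
  set P := (List.range j).filterMap (pvEnt pre p) with hP
  set S := ((List.range (pre.length - j - 1)).map (fun k => j + 1 + k)).filterMap (pvEnt pre p) with hS
  have hmP : m ∉ P := by
    intro hmem
    obtain ⟨i, hi, hei⟩ := pvFilterMap_mem hmem
    have h2 := (pvEnt_snd hei).1
    have hij : i < j := List.mem_range.mp hi
    rw [hm2] at h2
    have : j = i := by exact_mod_cast h2
    omega
  have hcand_eq : pvCand pre p = P ++ m :: S := by
    rw [pvCand_split pre p j hj, hentj]
    simp only [Option.toList_some, List.append_assoc, List.singleton_append]
    rw [hP, hS]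
  have herase : List.Perm (sA.2.2.erase m) (P ++ S) := by
    refine (hperm.erase m).trans ?_
    rw [hcand_eq, List.erase_append_right _ hmP, List.erase_cons_head]
  have hP' : (List.range j).filterMap (pvEnt pre p') = P := by
    rw [hP]
    apply List.filterMap_congr
    intro i hi
    exact pvEnt_set_ne _ _ _ _ _ (by have := List.mem_range.mp hi; omega)
  have hS' : ((List.range (pre.length - j - 1)).map (fun k => j + 1 + k)).filterMap (pvEnt pre p') = S := by
    rw [hS]
    apply List.filterMap_congr
    intro i hi
    obtain ⟨k, _, rfl⟩ := List.mem_map.mp hi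
    exact pvEnt_set_ne _ _ _ _ _ (by omega)
  have hcand' : pvCand pre p' = P ++ (pvEnt pre p' j).toList ++ S := by
    rw [pvCand_split pre p' j hj, hP', hS']
  -- provide the new pointer list
  refine ⟨p', by simp [hp', hplen], by rw [hBstep], by rw [hAstep, hBstep, hcost], ?_, ?_, ?_, ?_⟩
  · -- lists
    rw [hAstep, hA2, pvMapRange_set _ _ _ _ hj]
    apply List.map_congr_left
    intro i hi
    rcases eq_or_ne i j with rfl | hne
    · rw [if_pos rfl, hp', pvGetD_set_self _ _ _ _ hjp]
    · rw [if_neg hne, hp', pvGetD_set_ne _ _ _ _ _ hne]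
  · -- queue permutation
    rw [hAstep, hcand']
    by_cases hlive : pj + 1 < (pre.getD j []).length
    · have hne : ((pre.getD j []).drop (pj + 1)).reverse ≠ [] := (pvDropRev_ne_nil _ _).mpr hlive
      rw [if_pos hne]
      have hentj' : pvEnt pre p' j = some ((pre.getD j []).getD (pj + 1) 0, (j : Int)) := by
        unfold pvEnt
        rw [hp', pvGetD_set_self _ _ _ _ hjp, if_pos hlive]
      rw [hentj', pvDropRev_last _ _ hlive, hm2]
      refine (herase.append_right _).trans ?_
      simp only [Option.toList_some, List.append_assoc]
      exact List.Perm.append_left P (List.perm_append_comm)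
    · have hne : ¬ ((pre.getD j []).drop (pj + 1)).reverse ≠ [] := by
        simp only [ne_eq, pvDropRev_ne_nil, not_not]
        omega
      rw [if_neg hne]
      have hentj' : pvEnt pre p' j = none := by
        unfold pvEnt
        rw [hp', pvGetD_set_self _ _ _ _ hjp, if_neg hlive]
      rw [hentj']
      simpa using herase
  · -- pointer bounds
    intro i hi
    rcases eq_or_ne i j with rfl | hne
    · rw [hp', pvGetD_set_self _ _ _ _ hjp]
      omega
    · rw [hp', pvGetD_set_ne _ _ _ _ _ hne]
      exact hlen i hi
  · -- the count of remaining increments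
    have hSS := pvSumRange_set pre.length j p (pj + 1) hj hjp
    rw [← hp'] at hSS
    omega

theorem pvLoop (pre : List (List Int)) (N : Int) (hN : N.toNat = pre.length)
    (ls : List Int) (sA : Int × List (List Int) × List (Int × Int)) (sB : Int × List Int)
    (h : pvInv pre sA sB ls.length) :
    (ls.foldl pvStepA sA).1 = (ls.foldl (pvStepB pre N) sB).1 := by
  induction ls generalizing sA sB with
  | nil =>
    obtain ⟨p, _, _, hcost, _⟩ := h
    simpa using hcost
  | cons a t ih =>
    simp only [List.foldl_cons]
    exact ih _ _ (pvStep pre N hN sA sB t.length a a (by simpa using h))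



theorem pvWitness_ok :
    Dom_my_solve pvWitness_my_solve.1 pvWitness_my_solve.2.1 pvWitness_my_solve.2.2.1
      pvWitness_my_solve.2.2.2.1 pvWitness_my_solve.2.2.2.2.1 pvWitness_my_solve.2.2.2.2.2 ∧
    Pre_my_solve pvWitness_my_solve.1 pvWitness_my_solve.2.1 pvWitness_my_solve.2.2.1
      pvWitness_my_solve.2.2.2.1 pvWitness_my_solve.2.2.2.2.1 pvWitness_my_solve.2.2.2.2.2 := by
  constructor <;> decide

theorem pvRepCast (m : Nat) :
    (List.replicate m (0 : Int)) = (List.replicate m (0 : Nat)).map (fun x => (x : Int)) := by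
  induction m with
  | zero => rfl
  | succ k ih =>
    rw [List.replicate_succ, List.replicate_succ, ih]
    rfl

theorem pvBuildA (wages : List (List (Int × Int))) (base : List (List Int)) (eqCost : List Int)
    (l : List Int) (l1 : List (List Int)) (l2 : List (Int × Int)) :
    l.foldl (fun (st : List (List Int) × List (Int × Int)) i =>
      let w := pvPrepA (PySem.List.pyGetD wages i []) (PySem.List.pyGetD base i []) eqCost
      (st.1 ++ [w], st.2 ++ [(PySem.List.pyGetD w (-1) 0, i)])) (l1, l2)
    = (l1 ++ l.map (fun i => pvPrepA (PySem.List.pyGetD wages i []) (PySem.List.pyGetD base i []) eqCost),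
       l2 ++ l.map (fun i => (PySem.List.pyGetD (pvPrepA (PySem.List.pyGetD wages i []) (PySem.List.pyGetD base i []) eqCost) (-1) 0, i))) := by
  induction l generalizing l1 l2 with
  | nil => simp
  | cons a t ih => simp [ih]

-- ===== VERDICT (by name: the statement is the Claim_ definition above) =====
theorem my_solve_spec : Claim_equal_my_solve := by
  unfold Claim_equal_my_solve
  intro N M K base wages eqCost hdom hpre
  unfold Spec_my_solve
  obtain ⟨hbN, hwN, hrows, hK⟩ := hpre
  set n := N.toNat with hn
  set g := fun k : Nat => pvPrepB (wages.getD k []) (base.getD k []) eqCost with hg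
  set pre := (List.range n).map g with hpre_def
  have hprelen : pre.length = n := by rw [hpre_def]; simp
  have hpreget : ∀ i < n, pre.getD i [] = g i := fun i hi => by
    rw [hpre_def, PySem.List.getD_map_range _ _ _ _ hi]
  have hgne : ∀ i < n, 0 < (g i).length := by
    intro i hi
    rw [hg]
    simp only []
    rw [pvPrepB_length]
    have h1 := List.length_pos_of_ne_nil (hrows i hi).1
    have h2 := List.length_pos_of_ne_nil (hrows i hi).2.1
    omega
  have hrep : ∀ i : Nat, (List.replicate n (0 : Nat)).getD i 0 = 0 := by
    intro i
    by_cases h : i < n <;> simp [List.getD, List.getElem?_replicate, h]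
  -- A's first loop builds the reversed prepared lists and the initial queue
  have hA : my_solve N M K base wages eqCost
      = ((PySem.List.pyRange 0 K 1).foldl pvStepA
          (0,
           (PySem.List.pyRange 0 N 1).map (fun i =>
             pvPrepA (PySem.List.pyGetD wages i []) (PySem.List.pyGetD base i []) eqCost),
           (PySem.List.pyRange 0 N 1).map (fun i =>
             (PySem.List.pyGetD (pvPrepA (PySem.List.pyGetD wages i []) (PySem.List.pyGetD base i []) eqCost) (-1) 0, i)))).1 := by
    simp only [my_solve]
    rw [pvBuildA]
    simp only [List.nil_append]
    rfl
  have hmapA : (PySem.List.pyRange 0 N 1).map (fun i =>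
        pvPrepA (PySem.List.pyGetD wages i []) (PySem.List.pyGetD base i []) eqCost)
      = (List.range n).map (fun i =>
          ((pre.getD i []).drop ((List.replicate n (0 : Nat)).getD i 0)).reverse) := by
    rw [PySem.List.pyRange_zero, List.map_map]
    apply List.map_congr_left
    intro k hk
    have hk' := List.mem_range.mp hk
    simp only [Function.comp]
    rw [PySem.List.pyGetD_natCast, PySem.List.pyGetD_natCast, pvPrepAB, hpreget k hk', hrep k,
      List.drop_zero, hg]
  have hmapQ : (PySem.List.pyRange 0 N 1).map (fun i =>
        (PySem.List.pyGetD (pvPrepA (PySem.List.pyGetD wages i []) (PySem.List.pyGetD base i []) eqCost) (-1) 0, i))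
      = (List.range n).map (fun k => ((g k).getD 0 0, (k : Int))) := by
    rw [PySem.List.pyRange_zero, List.map_map]
    apply List.map_congr_left
    intro k hk
    have hk' := List.mem_range.mp hk
    simp only [Function.comp]
    rw [PySem.List.pyGetD_natCast, PySem.List.pyGetD_natCast, pvPrepAB]
    have h0 := pvDropRev_last (g k) 0 (hgne k hk')
    rw [List.drop_zero] at h0
    rw [hg]
    simp only []
    rw [h0]
  have hcand0 : pvCand pre (List.replicate n 0)
      = (List.range n).map (fun k => ((g k).getD 0 0, (k : Int))) := by
    unfold pvCand
    rw [hprelen]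
    apply pvFilterMap_eq_map
    intro i hi
    have hi' := List.mem_range.mp hi
    unfold pvEnt
    rw [hpreget i hi', hrep i, if_pos (hgne i hi')]
  -- B's build equals pre
  have hBbuild : (PySem.List.pyRange 0 N 1).foldl (fun acc i =>
        acc ++ [pvPrepB (PySem.List.pyGetD wages i []) (PySem.List.pyGetD base i []) eqCost]) []
      = pre := by
    rw [PySem.List.foldl_append_singleton_eq_map, List.nil_append, PySem.List.pyRange_zero,
      List.map_map, hpre_def]
    apply List.map_congr_left
    intro k _
    simp only [Function.comp]
    rw [PySem.List.pyGetD_natCast, PySem.List.pyGetD_natCast, hg]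
  have hB : my_solve_alt N M K base wages eqCost
      = ((PySem.List.pyRange 0 K 1).foldl (pvStepB pre N) (0, List.replicate n (0 : Int))).1 := by
    simp only [my_solve_alt]
    rw [hBbuild]
    rfl
  rw [hA, hB]
  apply pvLoop pre N (by rw [hprelen])
  refine ⟨List.replicate n 0, ?_, ?_, rfl, ?_, ?_, ?_, ?_⟩
  · rw [List.length_replicate, hprelen]
  · exact pvRepCast n
  · rw [hprelen]
    exact hmapA
  · rw [hmapQ, hcand0]
  · intro i _
    rw [hrep i]
    exact Nat.zero_le _
  · rw [hprelen, PySem.List.length_pyRange_one]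
    have h1 : ((List.range n).map (fun i => (List.replicate n (0 : Nat)).getD i 0)).sum = 0 := by
      rw [List.map_congr_left (fun i _ => hrep i)]
      simp
    have h2 : ((List.range n).map (fun i => (pre.getD i []).length)).sum
        = ((List.range n).map (fun i => min (wages.getD i []).length (base.getD i []).length)).sum := by
      apply congrArg
      apply List.map_congr_left
      intro i hi
      rw [hpreget i (List.mem_range.mp hi), hg]
      simp only []
      rw [pvPrepB_length]
    rw [h1, h2]
    simpa using hK
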